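-- pv_equiv track=rewrite | github.com/ids-infotech/corsearch_project | country/tunisia/application_and_logos_screenshots_tunisia_445.py | merge_duplicate_pages_for_application_screenshots
-- ===== SOURCE A (Python) =====
-- def merge_duplicate_pages_for_application_screenshots(content_data):
--     # Create a dictionary to store consolidated texts
--     consolidated_data = {}
--
--     for entry in content_data:
--         page_num = entry["text_on_page"]
--         text = entry["text"].strip()  # Remove any leading/trailing white spaces
--
--         # Skip the entry if the text is empty
--         if not text:
--             continue
--
--         if page_num not in consolidated_data:
--             consolidated_data[page_num] = text
--         else:
--             # Add a space before appending the next text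
--             consolidated_data[page_num] += " " + text
--
--     # Convert the consolidated data dictionary back to a list format
--     merged_data = [{"text_on_page": k, "text": v} for k, v in consolidated_data.items()]
--     # Optionally, sort the list by 'text_on_page' if needed
--     merged_data.sort(key=lambda x: x["text_on_page"])
--
--     return merged_data
-- ===== SOURCE B (Python) =====
-- def merge_duplicate_pages_for_application_screenshots(content_data):
--     # Collect non-empty stripped texts as (page, text) pairs in original order.
--     pairs = []
--     for entry in content_data:
--         text = entry["text"].strip()
--         if text:
--             pairs.append((entry["text_on_page"], text))
--
--     # One joined record per distinct page, pages in sorted order.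
--     pages = sorted({p for p, _ in pairs})
--     return [{"text_on_page": p,
--              "text": " ".join(t for q, t in pairs if q == p)}
--             for p in pages]
-- ===== Notes on version B (the rewrite author's own statement) =====
-- stated objective: alternative
-- what changed: A accumulates texts into a dict keyed by page and then sorts the dict's items; B builds a flat list of (page, stripped-text) pairs, takes the sorted set of distinct pages, and emits one record per page by joining that page's texts in one filter pass.
import Mathlib
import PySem

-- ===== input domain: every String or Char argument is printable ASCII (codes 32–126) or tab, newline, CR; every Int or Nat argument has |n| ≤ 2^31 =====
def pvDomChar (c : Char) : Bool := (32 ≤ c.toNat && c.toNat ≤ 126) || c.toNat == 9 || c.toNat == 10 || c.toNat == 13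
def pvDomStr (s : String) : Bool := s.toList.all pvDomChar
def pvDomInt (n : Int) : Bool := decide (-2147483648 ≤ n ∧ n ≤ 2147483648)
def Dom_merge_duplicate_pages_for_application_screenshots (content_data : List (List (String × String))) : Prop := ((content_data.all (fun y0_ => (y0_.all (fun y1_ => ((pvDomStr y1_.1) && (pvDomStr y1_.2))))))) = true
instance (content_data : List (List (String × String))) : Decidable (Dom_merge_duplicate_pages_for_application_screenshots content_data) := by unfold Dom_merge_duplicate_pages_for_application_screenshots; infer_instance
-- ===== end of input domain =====

-- B replaces A's dict-accumulate-then-sort with filter-to-pairs, sorted distinct pages, and a per-page join (objective: alternative decomposition, same result).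

-- ===== PORT A =====
def merge_duplicate_pages_for_application_screenshots (content_data : List (List (String × String))) : List (List (String × String)) :=
  let consolidated : PySem.Dict String String :=
    content_data.foldl (fun d entry =>
      -- entry["text_on_page"] / entry["text"]: Pre_ guarantees both keys are present, so getD never hits its default
      let page_num := (PySem.Dict.mk entry).getD "text_on_page" ""
      let text := PySem.Str.strip ((PySem.Dict.mk entry).getD "text" "")
      if text = "" then d
      else if !(d.contains page_num) then d.insert page_num text
      else d.insert page_num (d.getD page_num "" ++ " " ++ text)) PySem.Dict.empty
  let merged := consolidated.items.map (fun kv => [("text_on_page", kv.1), ("text", kv.2)])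
  PySem.List.sorted merged (fun x => (PySem.Dict.mk x).getD "text_on_page" "") false

-- ===== PORT B =====
def merge_duplicate_pages_for_application_screenshots_alt (content_data : List (List (String × String))) : List (List (String × String)) :=
  let pairs : List (String × String) :=
    content_data.foldl (fun acc entry =>
      let text := PySem.Str.strip ((PySem.Dict.mk entry).getD "text" "")
      if text ≠ "" then acc ++ [((PySem.Dict.mk entry).getD "text_on_page" "", text)] else acc) []
  let pages := PySem.List.sorted (PySem.Set.ofList (pairs.map (fun p => p.1))) (fun x => x) false
  pages.map (fun p =>
    [("text_on_page", p),
     ("text", PySem.Str.join " " ((pairs.filter (fun q => q.1 == p)).map (fun q => q.2)))])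

-- ===== PRECONDITION & SPEC =====
-- Pre_ excludes exactly the inputs on which Python A raises KeyError: an entry missing the "text_on_page" or "text" key.
def Pre_merge_duplicate_pages_for_application_screenshots (content_data : List (List (String × String))) : Prop :=
  (content_data.all (fun e => (PySem.Dict.mk e).contains "text_on_page" && (PySem.Dict.mk e).contains "text")) = true
instance (content_data : List (List (String × String))) : Decidable (Pre_merge_duplicate_pages_for_application_screenshots content_data) := by unfold Pre_merge_duplicate_pages_for_application_screenshots; infer_instance
def pvWitness_merge_duplicate_pages_for_application_screenshots : (List (List (String × String))) :=
  [[("text_on_page", "2"), ("text", " b ")],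
   [("text_on_page", "1"), ("text", "a")],
   [("text_on_page", "2"), ("text", "c")],
   [("text_on_page", "9"), ("text", "   ")]]
def Spec_merge_duplicate_pages_for_application_screenshots (content_data : List (List (String × String))) (out : List (List (String × String))) : Prop := out = merge_duplicate_pages_for_application_screenshots_alt content_data
instance (content_data : List (List (String × String))) (out : List (List (String × String))) : Decidable (Spec_merge_duplicate_pages_for_application_screenshots content_data out) := by unfold Spec_merge_duplicate_pages_for_application_screenshots; infer_instance

-- ===== CLAIM (what is proved, stated in full; the proofs are below) =====
def Claim_equal_merge_duplicate_pages_for_application_screenshots : Prop := ∀ (content_data : List (List (String × String))), Dom_merge_duplicate_pages_for_application_screenshots content_data → Pre_merge_duplicate_pages_for_application_screenshots content_data → Spec_merge_duplicate_pages_for_application_screenshots content_data (merge_duplicate_pages_for_application_screenshots content_data)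

-- ===== LEMMAS AND PROOFS =====

-- proof-only abbreviations: A's loop step on an already-extracted (page, text) pair, and the per-page join
def pvStep (d : PySem.Dict String String) (p : String × String) : PySem.Dict String String :=
  if !(d.contains p.1) then d.insert p.1 p.2 else d.insert p.1 (d.getD p.1 "" ++ " " ++ p.2)
def pvJoin (ps : List (String × String)) (k : String) : String :=
  PySem.Str.join " " ((ps.filter (fun q => q.1 == k)).map (fun q => q.2))
def pvRec (ps : List (String × String)) (k : String) : List (String × String) :=
  [("text_on_page", k), ("text", pvJoin ps k)]

theorem pvJoin_single (sep y : String) : PySem.Str.join sep [y] = y := by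
  apply String.toList_injective
  simp [PySem.Str.toList_join, PySem.Chars.join, List.intercalate]

theorem chars_intercalate_snoc {α : Type} (sep : List α) (xs : List (List α)) (y : List α) (h : xs ≠ []) :
    sep.intercalate (xs ++ [y]) = sep.intercalate xs ++ sep ++ y := by
  induction xs with
  | nil => simp at h
  | cons a l ih =>
    cases l with
    | nil => simp [List.intercalate]
    | cons b m =>
      have := ih (by simp)
      simp [List.intercalate] at this ⊢
      simp [this]

theorem pvJoin_snoc (sep : String) (xs : List String) (y : String) (h : xs ≠ []) :
    PySem.Str.join sep (xs ++ [y]) = PySem.Str.join sep xs ++ sep ++ y := by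
  apply String.toList_injective
  rw [PySem.Str.toList_join, PySem.Chars.join, List.map_append, List.map_singleton,
    chars_intercalate_snoc _ _ _ (by simpa using h)]
  simp [PySem.Str.toList_join, PySem.Chars.join]

theorem pvJoin_append_self (qs : List (String × String)) (p : String × String)
    (hm : p.1 ∈ qs.map (fun q => q.1)) :
    pvJoin (qs ++ [p]) p.1 = pvJoin qs p.1 ++ " " ++ p.2 := by
  unfold pvJoin
  rw [List.filter_append, List.map_append]
  have hf : List.filter (fun q => q.1 == p.1) [p] = [p] := by simp
  rw [hf, List.map_singleton]
  apply pvJoin_snoc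
  obtain ⟨q, hq, hq1⟩ := List.mem_map.mp hm
  have : q ∈ List.filter (fun q => q.1 == p.1) qs := by
    simp [List.mem_filter, hq, hq1]
  simp only [ne_eq, List.map_eq_nil_iff]
  exact List.ne_nil_of_mem this

theorem pvJoin_append_ne (qs : List (String × String)) (p : String × String) (k : String)
    (hk : k ≠ p.1) : pvJoin (qs ++ [p]) k = pvJoin qs k := by
  unfold pvJoin
  rw [List.filter_append]
  have : List.filter (fun q => q.1 == k) [p] = [] := by
    simp [Ne.symm hk]
  rw [this, List.append_nil]

-- A's accumulation loop, characterised: one item per distinct page (first-occurrence order), value = the per-page join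
theorem pv_items_foldl (ps : List (String × String)) :
    (ps.foldl pvStep PySem.Dict.empty).items
      = (PySem.Set.ofList (ps.map (fun p => p.1))).map (fun k => (k, pvJoin ps k)) := by
  induction ps using List.reverseRecOn with
  | nil => simp [PySem.Set.ofList_nil, PySem.Dict.empty]
  | append_singleton qs p ih =>
    rw [List.foldl_append, List.foldl_cons, List.foldl_nil]
    set d := qs.foldl pvStep PySem.Dict.empty with hd
    have hkeys : d.keys = PySem.Set.ofList (qs.map (fun q => q.1)) := by
      have h0 : d.keys = d.items.map (fun p => p.1) := rfl
      rw [h0, ih, List.map_map]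
      apply List.map_id''; intro x; rfl
    have hnodup : d.keys.Nodup := by rw [hkeys]; exact PySem.Set.nodup_ofList _
    rw [List.map_append, List.map_singleton, PySem.Set.ofList_append_singleton]
    by_cases hm : p.1 ∈ qs.map (fun q => q.1)
    · have hc : d.contains p.1 = true :=
        (PySem.Dict.contains_iff_mem_keys d p.1).mpr (by rw [hkeys]; exact (PySem.Set.mem_ofList _ _).mpr hm)
      have hstep : pvStep d p = d.insert p.1 (d.getD p.1 "" ++ " " ++ p.2) := by
        simp [pvStep, hc]
      have hget : d.getD p.1 "" = pvJoin qs p.1 := by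
        apply PySem.Dict.getD_of_mem_items _ _ hnodup
        rw [ih]
        exact List.mem_map.mpr ⟨p.1, (PySem.Set.mem_ofList _ _).mpr hm, rfl⟩
      rw [hstep, PySem.Dict.items_insert_of_contains _ _ hc, ih,
        PySem.Set.add_of_mem ((PySem.Set.mem_ofList _ _).mpr hm), List.map_map]
      apply List.map_congr_left
      intro k hk
      by_cases hkp : k = p.1
      · subst hkp
        simp [hget, pvJoin_append_self qs p hm]
      · simp [hkp, pvJoin_append_ne qs p k hkp]
    · have hc : d.contains p.1 = false := by
        rw [← Bool.not_eq_true]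
        intro h
        exact hm ((PySem.Set.mem_ofList _ _).mp (hkeys ▸ (PySem.Dict.contains_iff_mem_keys d p.1).mp h))
      have hstep : pvStep d p = d.insert p.1 p.2 := by simp [pvStep, hc]
      have hnm : p.1 ∉ PySem.Set.ofList (qs.map (fun q => q.1)) := fun h => hm ((PySem.Set.mem_ofList _ _).mp h)
      rw [hstep, PySem.Dict.items_insert_of_not_contains _ _ hc, ih,
        PySem.Set.add_of_not_mem hnm, List.map_append]
      congr 1
      · apply List.map_congr_left
        intro k hk
        have hkp : k ≠ p.1 := by
          intro h; subst h; exact hnm hk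
        simp [pvJoin_append_ne qs p k hkp]
      · simp only [List.map_singleton]
        have : pvJoin (qs ++ [p]) p.1 = p.2 := by
          unfold pvJoin
          rw [List.filter_append]
          have h1 : List.filter (fun q => q.1 == p.1) qs = [] := by
            rw [List.filter_eq_nil_iff]
            intro q hq
            simp only [beq_iff_eq]
            intro h; exact hm (List.mem_map.mpr ⟨q, hq, h⟩)
          have h2 : List.filter (fun q => q.1 == p.1) [p] = [p] := by simp
          rw [h1, h2, List.nil_append, List.map_singleton, pvJoin_single]
        rw [this]

theorem pv_keyf_rec (ps : List (String × String)) (k : String) :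
    (PySem.Dict.mk (pvRec ps k)).getD "text_on_page" "" = k := by
  simp [pvRec, PySem.Dict.getD_eq_get?_getD, PySem.Dict.get?_mk_cons]

-- sorting the records by their page key = mapping the records over the sorted distinct pages
theorem pv_sorted_map (ps : List (String × String)) :
    PySem.List.sorted ((PySem.Set.ofList (ps.map (fun p => p.1))).map (pvRec ps))
        (fun x => (PySem.Dict.mk x).getD "text_on_page" "") false
      = (PySem.List.sorted (PySem.Set.ofList (ps.map (fun p => p.1))) (fun x => x) false).map (pvRec ps) := by
  apply PySem.List.sorted_eq_of_perm_of_pairwise_lt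
  · exact ((PySem.List.sorted_perm _ _ _)).map _
  · exact List.Pairwise.map _ (fun a b h => by simpa [pv_keyf_rec] using h)
      (PySem.List.sorted_ofList_pairwise_lt _)

-- ===== VERDICT (by name: the statement is the Claim_ definition above) =====
theorem merge_duplicate_pages_for_application_screenshots_spec : Claim_equal_merge_duplicate_pages_for_application_screenshots := by
  intro cd _ _
  unfold Spec_merge_duplicate_pages_for_application_screenshots
  unfold merge_duplicate_pages_for_application_screenshots merge_duplicate_pages_for_application_screenshots_alt
  have hbodyA : (fun (d : PySem.Dict String String) entry =>
      let page_num := (PySem.Dict.mk entry).getD "text_on_page" ""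
      let text := PySem.Str.strip ((PySem.Dict.mk entry).getD "text" "")
      if text = "" then d
      else if !(d.contains page_num) then d.insert page_num text
      else d.insert page_num (d.getD page_num "" ++ " " ++ text))
      = fun d e => if ¬((PySem.Str.strip ((PySem.Dict.mk e).getD "text" "")) = "") then
          pvStep d ((PySem.Dict.mk e).getD "text_on_page" "", PySem.Str.strip ((PySem.Dict.mk e).getD "text" "")) else d := by
    funext d e
    by_cases h : PySem.Str.strip ((PySem.Dict.mk e).getD "text" "") = "" <;> simp [h, pvStep]
  have hbodyB : (fun (acc : List (String × String)) entry =>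
      let text := PySem.Str.strip ((PySem.Dict.mk entry).getD "text" "")
      if text ≠ "" then acc ++ [((PySem.Dict.mk entry).getD "text_on_page" "", text)] else acc)
      = fun acc e => if ¬((PySem.Str.strip ((PySem.Dict.mk e).getD "text" "")) = "") then
          acc ++ [(fun e => ((PySem.Dict.mk e).getD "text_on_page" "", PySem.Str.strip ((PySem.Dict.mk e).getD "text" ""))) e] else acc := rfl
  rw [hbodyA, hbodyB,
    PySem.List.foldl_ite_eq_foldl_filter (fun e => ¬((PySem.Str.strip ((PySem.Dict.mk e).getD "text" "")) = "")),
    PySem.List.foldl_append_ite (fun e => ¬((PySem.Str.strip ((PySem.Dict.mk e).getD "text" "")) = "")),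
    List.nil_append, ← List.foldl_map]
  set P := (cd.filter (fun e => decide ¬((PySem.Str.strip ((PySem.Dict.mk e).getD "text" "")) = ""))).map
      (fun e => ((PySem.Dict.mk e).getD "text_on_page" "", PySem.Str.strip ((PySem.Dict.mk e).getD "text" ""))) with hP
  dsimp only
  rw [pv_items_foldl P, List.map_map]
  have hrec : ((fun kv : String × String => [("text_on_page", kv.1), ("text", kv.2)]) ∘ fun k => (k, pvJoin P k)) = pvRec P := by
    funext k; rfl
  rw [hrec, pv_sorted_map P]
  rfl
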